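-- pv_equiv track=rewrite | github.com/KirstenLNelson/epsilon-almost-covering-arrays | gencoverarrays.py | create_second_row
-- ===== SOURCE A (Python) =====
-- def create_second_row(base_row, v):
-- # ------------------------------------------------------
-- # Examples:
--     '''
--     >>> create_second_row([0,0,0,0,1,1,1,2,2,2],3)
--     [0, 0, 1, 2, 0, 1, 2, 0, 1, 2]
--     >>> create_second_row([0,0,0,0,1,1,1,1],2)
--     [0, 0, 1, 1, 0, 0, 1, 1]
--     >>> create_second_row([0,0,0,1,1],2)
--     [0, 0, 1, 0, 1]
--     >>> create_second_row([0,0,0,0,0,1,1,1,1,1],2)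
--     [0, 0, 0, 1, 1, 0, 0, 1, 1, 1]
--     '''
-- # Initialize the list we'll be returning
--     row_buckets = []
--     for k in range(0, v):
--         row_buckets.append([])
-- # Keep track of which bucket is next to dump an element in
--     bucket_num = 0
--     for k in range(0, len(base_row)):
--         row_buckets[bucket_num].append(base_row[k])
--         bucket_num = (bucket_num + 1) % v
-- # Flatten the list of lists into a single list to return
--     second_row = [item for sublist in row_buckets for item in sublist]
--     return second_row
-- ===== SOURCE B (Python) =====
-- def create_second_row(base_row, v):
--     # counting-sort style direct placement: compute each bucket's output offset,
--     # then scatter every element straight to its final position in one pass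
--     n = len(base_row)
--     starts = []
--     pos = 0
--     for b in range(v):          # bucket b holds ceil((n - b) / v) elements
--         starts.append(pos)
--         pos += (n - b + v - 1) // v
--     out = [0] * n
--     for i, x in enumerate(base_row):
--         b = i % v
--         out[starts[b]] = x
--         starts[b] += 1
--     return out
-- ===== Notes on version B (the rewrite author's own statement) =====
-- stated objective: alternative
-- what changed: Replaces A's element-by-element round-robin distribution into v bucket lists plus a final flatten by a counting-sort-style direct placement: B computes each bucket's output offset arithmetically (ceil((n-b)/v)) and scatters every element straight to its final position in one pass.
import Mathlib
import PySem

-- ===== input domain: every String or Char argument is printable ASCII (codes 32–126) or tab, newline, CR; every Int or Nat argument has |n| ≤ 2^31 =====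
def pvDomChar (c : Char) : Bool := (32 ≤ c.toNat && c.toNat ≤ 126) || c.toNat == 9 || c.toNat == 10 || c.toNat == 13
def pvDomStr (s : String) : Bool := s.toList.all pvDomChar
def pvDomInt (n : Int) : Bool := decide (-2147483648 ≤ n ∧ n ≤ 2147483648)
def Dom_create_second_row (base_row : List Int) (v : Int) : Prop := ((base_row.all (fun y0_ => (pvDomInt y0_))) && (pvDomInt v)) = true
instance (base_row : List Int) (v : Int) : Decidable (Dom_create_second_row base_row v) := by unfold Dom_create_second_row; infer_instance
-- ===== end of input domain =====

-- B replaces A's element-by-element round-robin distribution into v bucket lists (plus a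
-- final flatten) by a counting-sort-style direct placement: it computes each bucket's output
-- offset arithmetically and scatters every element straight to its final position in one
-- pass; objective: alternative. Equality of the RETURN value is proved on Pre_ (both
-- programs raise on nonempty base_row with v ≤ 0).

-- ===== PORT A =====
-- literal port of A: build v empty buckets, distribute base_row[k] round-robin, flatten.
-- (Array.push models Python's O(1) list append; List.modify at s.2.toNat models
-- row_buckets[bucket_num].append; under Pre_ the index is
-- always a nonnegative in-range Int, exactly Python's behaviour.)
def create_second_row (base_row : List Int) (v : Int) : List Int :=
  let row_buckets : List (List Int) :=
    ((PySem.List.pyRange 0 v 1).foldl (fun acc _ => acc.push []) #[]).toList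
  let st :=
    (PySem.List.pyRange 0 ((base_row.length : Int)) 1).foldl
      (fun (s : List (List Int) × Int) k =>
        (s.1.modify s.2.toNat (fun l => l ++ [PySem.List.pyGetD base_row k 0]),
         PySem.Int.mod (s.2 + 1) v))
      (row_buckets, 0)
  st.1.flatten

-- ===== PORT B =====
-- literal port of Source B: first loop builds the starts offset table (floordiv = Python //),
-- second loop scatters each element to out[starts[i % v]] and bumps that offset.
-- (pySetD/pyGetD model the subscripts; under Pre_ every index is nonnegative and in range,
-- exactly Python's behaviour.)
def create_second_row_alt (base_row : List Int) (v : Int) : List Int :=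
  let n : Int := base_row.length
  let sp :=
    (PySem.List.pyRange 0 v 1).foldl
      (fun (s : Array Int × Int) b =>
        (s.1.push s.2, s.2 + PySem.Int.floordiv (n - b + v - 1) v))
      (#[], 0)
  let out0 : List Int := List.replicate n.toNat 0
  let st :=
    (PySem.List.enumerate base_row).foldl
      (fun (s : List Int × List Int) p =>
        let b := PySem.Int.mod p.1 v
        let pos := PySem.List.pyGetD s.2 b 0
        (PySem.List.pySetD s.1 pos p.2, PySem.List.pySetD s.2 b (pos + 1)))
      (out0, sp.1.toList)
  st.1

-- ===== PRECONDITION & SPEC =====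
-- Pre_ excludes exactly the inputs where A raises IndexError (and B raises too):
-- nonempty base_row with v ≤ 0.
def Pre_create_second_row (base_row : List Int) (v : Int) : Prop :=
  base_row = [] ∨ 1 ≤ v
instance (base_row : List Int) (v : Int) : Decidable (Pre_create_second_row base_row v) := by
  unfold Pre_create_second_row; infer_instance
def pvWitness_create_second_row : List Int × Int := ([0, 0, 1, 2, 2], 3)

def Spec_create_second_row (base_row : List Int) (v : Int) (out : List Int) : Prop :=
  out = create_second_row_alt base_row v
instance (base_row : List Int) (v : Int) (out : List Int) : Decidable (Spec_create_second_row base_row v out) := by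
  unfold Spec_create_second_row; infer_instance

-- ===== CLAIM (what is proved, stated in full; the proofs are below) =====
def Claim_equal_create_second_row : Prop := ∀ (base_row : List Int) (v : Int), Dom_create_second_row base_row v → Pre_create_second_row base_row v → Spec_create_second_row base_row v (create_second_row base_row v)

-- ===== LEMMAS AND PROOFS =====

-- ---------- shared: the strided sublist sl n r xs = xs[r::n] ----------
def sl (n : Nat) : Nat → List Int → List Int
  | _, [] => []
  | 0, x :: xs => x :: sl n (n - 1) xs
  | c + 1, _ :: xs => sl n c xs

-- the common normal form both ports are reduced to
def tgt (n : Nat) (xs : List Int) : List Int :=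
  ((List.range n).map (fun j => sl n j xs)).flatten

def rrDist (n b j : Nat) : Nat := (j + n - b) % n

lemma rr_self (n b : Nat) (hb : b < n) : rrDist n b b = 0 := by
  unfold rrDist
  have : b + n - b = n := by omega
  simp [this]

lemma rr_zero (n j : Nat) (hj : j < n) : rrDist n 0 j = j := by
  unfold rrDist
  simp [Nat.add_mod_right, Nat.mod_eq_of_lt hj]

lemma rr_succ_self (n b : Nat) (hb : b < n) : rrDist n ((b + 1) % n) b = n - 1 := by
  unfold rrDist
  rcases Nat.lt_or_ge (b + 1) n with h | h
  · rw [Nat.mod_eq_of_lt h, Nat.mod_eq_of_lt (by omega)]; omega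
  · have hbn : b + 1 = n := by omega
    have : (b + 1) % n = 0 := by rw [hbn, Nat.mod_self]
    rw [this]
    have : b + n - 0 = b + n := by omega
    rw [this, Nat.add_mod_right, Nat.mod_eq_of_lt hb]
    omega

lemma rr_succ_ne (n b j : Nat) (hb : b < n) (hj : j < n) (hne : j ≠ b) :
    rrDist n ((b + 1) % n) j = rrDist n b j - 1 ∧ rrDist n b j ≠ 0 := by
  have key : ∀ (b' : Nat), b' < n → rrDist n b' j = if b' ≤ j then j - b' else j + n - b' := by
    intro b' hb'
    unfold rrDist
    split
    · have : j + n - b' = (j - b') + n := by omega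
      rw [this, Nat.add_mod_right, Nat.mod_eq_of_lt (by omega)]
    · rw [Nat.mod_eq_of_lt (by omega)]
  rcases Nat.lt_or_ge (b + 1) n with h | h
  · rw [Nat.mod_eq_of_lt h, key b hb, key (b+1) h]
    split <;> split <;> omega
  · have hbn : (b + 1) % n = 0 := by
      have : b + 1 = n := by omega
      rw [this, Nat.mod_self]
    rw [key b hb, hbn, key 0 (by omega)]
    split <;> split <;> omega

lemma mapIdx_replicate (n : Nat) (c : List Int) (f : Nat → List Int → List Int) :
    (List.replicate n c).mapIdx f = (List.range n).map (fun j => f j c) := by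
  apply List.ext_getElem
  · simp
  · intro i h1 h2
    simp

lemma bucketsInit (v : Int) :
    ((PySem.List.pyRange 0 v 1).foldl (fun acc (_ : Int) => acc.push ([] : List Int)) #[]).toList
      = List.replicate v.toNat [] := by
  have gen : ∀ (l : List Int) (init : List (List Int)),
      l.foldl (fun acc (_ : Int) => acc.push ([] : List Int)) init.toArray
        = (init ++ List.replicate l.length []).toArray := by
    intro l
    induction l with
    | nil => simp
    | cons x xs ih =>
      intro init
      rw [List.foldl_cons, List.push_toArray, ih]
      congr 1
      simp [List.replicate_succ]
  have := gen (PySem.List.pyRange 0 v 1) []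
  simp only [List.nil_append] at this
  rw [show (#[] : Array (List Int)) = ([] : List (List Int)).toArray by rfl, this,
      List.toList_toArray]
  simp [PySem.List.length_pyRange_one]

lemma foldA (n : Nat) (hn : 1 ≤ n) :
    ∀ (xs : List Int) (b : Nat) (_ : b < n) (B : List (List Int)) (_ : B.length = n),
      (xs.foldl
        (fun (s : List (List Int) × Int) x =>
          (s.1.modify s.2.toNat (fun l => l ++ [x]), PySem.Int.mod (s.2 + 1) (n : Int)))
        (B, (b : Int))).1
      = B.mapIdx (fun j Bj => Bj ++ sl n (rrDist n b j) xs) := by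
  intro xs
  induction xs with
  | nil =>
    intro b hb B hB
    simp only [List.foldl_nil]
    apply List.ext_getElem
    · simp
    · intro j h1 h2
      simp [sl]
  | cons x xs ih =>
    intro b hb B hB
    rw [List.foldl_cons]
    have hstep : ((B, (b : Int)).1.modify (B, (b : Int)).2.toNat (fun l => l ++ [x]),
        PySem.Int.mod ((B, (b : Int)).2 + 1) (n : Int))
        = (B.modify b (fun l => l ++ [x]), (((b + 1) % n : Nat) : Int)) := by
      rw [show ((b : Int) + 1) = (((b + 1 : Nat)) : Int) by push_cast; ring,
          PySem.Int.mod_natCast]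
      simp
    rw [hstep, ih ((b + 1) % n) (Nat.mod_lt _ (by omega)) _ (by simp [hB])]
    apply List.ext_getElem
    · simp
    · intro j h1 h2
      simp only [List.getElem_mapIdx, List.getElem_modify] at h1 h2 ⊢
      have hjn : j < n := by simpa [hB] using h2
      by_cases hjb : j = b
      · subst hjb
        rw [if_pos rfl, rr_succ_self n j hjn, rr_self n j hjn]
        show (B[j] ++ [x]) ++ sl n (n - 1) xs = B[j] ++ sl n 0 (x :: xs)
        rw [List.append_assoc]
        rfl
      · rw [if_neg (Ne.symm hjb)]
        obtain ⟨hstepd, hne0⟩ := rr_succ_ne n b j hb hjn hjb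
        rw [hstepd]
        congr 1
        rcases Nat.exists_eq_succ_of_ne_zero hne0 with ⟨d, hd⟩
        rw [hd]
        rfl

lemma mainA (base_row : List Int) (v : Int) (hv : 1 ≤ v) :
    create_second_row base_row v = tgt v.toNat base_row := by
  obtain ⟨n, rfl⟩ : ∃ n : Nat, v = (n : Int) := ⟨v.toNat, (Int.toNat_of_nonneg (by omega)).symm⟩
  have hn : 1 ≤ n := by omega
  unfold create_second_row tgt
  dsimp only
  rw [bucketsInit]
  rw [PySem.List.foldl_pyRange_zero_pyGetD' base_row 0
    (fun (s : List (List Int) × Int) x =>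
      (s.1.modify s.2.toNat (fun l => l ++ [x]), PySem.Int.mod (s.2 + 1) (n : Int)))
    (List.replicate ((n : Int)).toNat [], 0)]
  simp only [Int.toNat_natCast]
  rw [show (0 : Int) = ((0 : Nat) : Int) by rfl]
  rw [foldA n hn base_row 0 (by omega) _ (by simp)]
  rw [mapIdx_replicate]
  congr 1
  apply List.map_congr_left
  intro j hj
  rw [rr_zero n j (List.mem_range.mp hj)]
  simp

-- ---------- B side: bucket sizes, offsets, write counts ----------

-- size of bucket j (number of indices i < L with i % n = j), closed form
def szB (n L j : Nat) : Nat := (L - j + n - 1) / n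
-- output offset of bucket j = sum of the sizes of the earlier buckets
def offB (n L : Nat) : Nat → Nat
  | 0 => 0
  | j + 1 => offB n L j + szB n L j
-- number of elements among the first k already placed into bucket j
def cntB (n : Nat) : Nat → Nat → Nat
  | 0, _ => 0
  | k + 1, j => cntB n k j + (if k % n = j then 1 else 0)

lemma szB_succ (n k j : Nat) (hn : 1 ≤ n) (hj : j < n) :
    szB n (k+1) j = szB n k j + if k % n = j then 1 else 0 := by
  unfold szB
  rcases Nat.lt_or_ge k j with hjk | hjk
  · have e1 : k - j + n - 1 = n - 1 := by omega
    have e2 : k + 1 - j + n - 1 = n - 1 := by omega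
    have e3 : k % n = k := Nat.mod_eq_of_lt (by omega)
    rw [e1, e2, e3, if_neg (by omega)]; omega
  · have e : k + 1 - j + n - 1 = (k - j + n - 1) + 1 := by omega
    rw [e, Nat.succ_div]
    congr 1
    have e2 : k - j + n - 1 + 1 = (k - j) + n := by omega
    have hiff : (n ∣ k - j + n - 1 + 1) ↔ k % n = j := by
      rw [e2]
      constructor
      · intro h
        have h2 : n ∣ k - j := (Nat.dvd_add_self_right).mp h
        have := (Nat.modEq_iff_dvd' hjk).mpr h2
        unfold Nat.ModEq at this
        rw [Nat.mod_eq_of_lt hj] at this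
        omega
      · intro h
        have : j % n = k % n := by rw [Nat.mod_eq_of_lt hj, h]
        exact (Nat.dvd_add_self_right).mpr ((Nat.modEq_iff_dvd' hjk).mp this)
    simp only [hiff]

lemma cntB_closed (n : Nat) (hn : 1 ≤ n) : ∀ k j, j < n → cntB n k j = szB n k j := by
  intro k
  induction k with
  | zero =>
    intro j hj
    show 0 = szB n 0 j
    unfold szB
    rw [Nat.div_eq_of_lt (by omega)]
  | succ k ih =>
    intro j hj
    show cntB n k j + _ = _
    rw [ih j hj, szB_succ n k j hn hj]

lemma cntB_le (n : Nat) (_hn : 1 ≤ n) (k k' j : Nat) (h : k ≤ k') : cntB n k j ≤ cntB n k' j := by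
  induction k' with
  | zero => simp_all
  | succ m ih =>
    rcases Nat.lt_or_ge k (m+1) with h2 | h2
    · have := ih (by omega)
      show _ ≤ cntB n m j + _
      split <;> omega
    · have hk : k = m + 1 := by omega
      rw [hk]

lemma offB_succ_L (n L : Nat) (hn : 1 ≤ n) :
    ∀ j, j ≤ n → offB n (L+1) j = offB n L j + (if L % n < j then 1 else 0) := by
  intro j
  induction j with
  | zero => intro _; simp [offB]
  | succ j ih =>
    intro hj
    show offB n (L+1) j + szB n (L+1) j = (offB n L j + szB n L j) + _
    rw [ih (by omega), szB_succ n L j hn (by omega)]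
    have hmod : L % n < n := Nat.mod_lt _ (by omega)
    by_cases h : L % n < j
    · rw [if_pos h, if_neg (by omega), if_pos (by omega)]; omega
    · by_cases h2 : L % n = j
      · rw [if_neg h, if_pos h2, if_pos (by omega)]; omega
      · rw [if_neg h, if_neg h2, if_neg (by omega)]; omega

lemma offB_total (n : Nat) (hn : 1 ≤ n) : ∀ L, offB n L n = L := by
  intro L
  induction L with
  | zero =>
    have : ∀ j, offB n 0 j = 0 := by
      intro j
      induction j with
      | zero => rfl
      | succ j ih =>
        show offB n 0 j + szB n 0 j = 0
        rw [ih]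
        unfold szB
        rw [Nat.div_eq_of_lt (by omega)]
    exact this n
  | succ L ih =>
    rw [offB_succ_L n L hn n (le_refl n), ih, if_pos (Nat.mod_lt _ (by omega))]

lemma offB_mono (n L : Nat) : ∀ {j j'}, j ≤ j' → offB n L j ≤ offB n L j' := by
  intro j j' h
  induction j' with
  | zero => simp_all
  | succ m ih =>
    rcases Nat.lt_or_ge j (m+1) with h2 | h2
    · have := ih (by omega)
      show _ ≤ offB n L m + _
      omega
    · have hk : j = m + 1 := by omega
      rw [hk]

lemma offB_exists (n L : Nat) (hn : 1 ≤ n) (q : Nat) (hq : q < L) :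
    ∃ j < n, offB n L j ≤ q ∧ q < offB n L j + szB n L j := by
  have key : ∀ j, j ≤ n → q < offB n L j → ∃ j' < j, offB n L j' ≤ q ∧ q < offB n L j' + szB n L j' := by
    intro j
    induction j with
    | zero => intro _ h; simp [offB] at h
    | succ j ih =>
      intro hj h
      rcases Nat.lt_or_ge q (offB n L j) with h2 | h2
      · obtain ⟨j', hj', h3, h4⟩ := ih (by omega) h2
        exact ⟨j', by omega, h3, h4⟩
      · exact ⟨j, by omega, h2, h⟩
  obtain ⟨j, hj, h3, h4⟩ := key n (le_refl n) (by rw [offB_total n hn L]; exact hq)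
  exact ⟨j, hj, h3, h4⟩

lemma sl_getD (n : Nat) (hn : 1 ≤ n) :
    ∀ (xs : List Int) (r t : Nat), (sl n r xs).getD t 0 = xs.getD (r + n * t) 0 := by
  intro xs
  induction xs with
  | nil => intro r t; cases r <;> simp [sl]
  | cons x xs ih =>
    intro r t
    cases r with
    | zero =>
      cases t with
      | zero => simp [sl]
      | succ t =>
        show (x :: sl n (n-1) xs).getD (t+1) 0 = (x :: xs).getD (0 + n * (t+1)) 0
        have e : 0 + n * (t + 1) = (n - 1 + n * t) + 1 := by
          rw [Nat.mul_succ]; omega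
        rw [e]
        simp only [List.getD_cons_succ]
        exact ih (n-1) t
    | succ c =>
      show (sl n c xs).getD t 0 = (x :: xs).getD (c + 1 + n * t) 0
      have e : c + 1 + n * t = (c + n * t) + 1 := by omega
      rw [e]
      simp only [List.getD_cons_succ]
      exact ih c t

lemma len_sl (n : Nat) (hn : 1 ≤ n) :
    ∀ (xs : List Int) (r : Nat), (sl n r xs).length = szB n xs.length r := by
  intro xs
  induction xs with
  | nil =>
    intro r
    show 0 = szB n 0 r
    unfold szB
    rw [Nat.div_eq_of_lt (by omega)]
  | cons x xs ih =>
    intro r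
    cases r with
    | zero =>
      show (x :: sl n (n-1) xs).length = szB n (xs.length + 1) 0
      have h1 : (x :: sl n (n-1) xs).length = (sl n (n-1) xs).length + 1 := by simp
      rw [h1, ih (n-1)]
      unfold szB
      have e1 : xs.length + 1 - 0 + n - 1 = xs.length + n := by omega
      rw [e1]
      rcases Nat.lt_or_ge xs.length (n-1) with h | h
      · have e2 : xs.length - (n-1) + n - 1 = n - 1 := by omega
        rw [e2, Nat.div_eq_of_lt (by omega), Nat.add_div_right _ (by omega),
            Nat.div_eq_of_lt (by omega)]
      · have e2 : xs.length - (n-1) + n - 1 = xs.length := by omega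
        rw [e2, Nat.add_div_right _ (by omega)]
    | succ c =>
      show (sl n c xs).length = szB n (xs.length + 1) (c+1)
      rw [ih c]
      unfold szB
      have e : xs.length + 1 - (c+1) = xs.length - c := by omega
      rw [e]

lemma tgt_len_aux (n : Nat) (hn : 1 ≤ n) (xs : List Int) :
    ∀ j, (((List.range j).map (fun i => sl n i xs)).flatten).length = offB n xs.length j := by
  intro j
  induction j with
  | zero => simp [offB]
  | succ j ih =>
    rw [List.range_succ, List.map_append, List.flatten_append]
    show _ = offB n xs.length j + szB n xs.length j
    simp only [List.length_append, ih]
    simp [len_sl n hn xs j]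

lemma tgt_getD (n : Nat) (hn : 1 ≤ n) (xs : List Int) (j t : Nat) (hj : j < n)
    (ht : t < szB n xs.length j) :
    (tgt n xs).getD (offB n xs.length j + t) 0 = xs.getD (j + n * t) 0 := by
  unfold tgt
  have decomp : List.range n = List.range j ++ (j :: List.range' (j+1) (n - (j+1))) := by
    rw [List.range_eq_range']
    rw [show n = j + (n - j) by omega]
    rw [← List.range'_append (s := 0) (m := j) (n := n - j) (step := 1)]
    congr 1
    · rw [List.range_eq_range']
    · rw [show n - j = (n - (j+1)) + 1 by omega]
      rw [List.range'_succ]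
      simp
      omega
  rw [decomp]
  simp only [List.map_append, List.flatten_append, List.map_cons, List.flatten_cons]
  rw [List.getD_append_right _ _ _ _ (by rw [tgt_len_aux n hn xs j]; omega),
      tgt_len_aux n hn xs j]
  have e : offB n xs.length j + t - offB n xs.length j = t := by omega
  rw [e, List.getD_append _ _ _ _ (by rw [len_sl n hn xs j]; omega)]
  exact sl_getD n hn xs j t

lemma tgt_len (n : Nat) (hn : 1 ≤ n) (xs : List Int) : (tgt n xs).length = xs.length := by
  have := tgt_len_aux n hn xs n
  unfold tgt
  rw [this, offB_total n hn]

lemma szB_self (n k : Nat) (hn : 1 ≤ n) : szB n k (k % n) = k / n := by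
  have h := Nat.div_add_mod k n
  have hm := Nat.mod_lt k (show 0 < n by omega)
  unfold szB
  have e : k - k % n + n - 1 = (n - 1) + n * (k / n) := by omega
  rw [e, Nat.add_mul_div_left _ _ (show 0 < n by omega), Nat.div_eq_of_lt (by omega)]; omega

-- main scatter invariant

lemma scatter (n : Nat) (hn : 1 ≤ n) (base_row : List Int) :
    ∀ (l : List Int) (k : Nat) (out : List Int),
      base_row.length = k + l.length →
      l = base_row.drop k →
      out.length = base_row.length →
      (∀ j, j < n → ∀ t, t < cntB n k j →
        out.getD (offB n base_row.length j + t) 0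
          = (tgt n base_row).getD (offB n base_row.length j + t) 0) →
      ((PySem.List.enumerate l (k : Int)).foldl
          (fun (s : List Int × List Int) p =>
            (PySem.List.pySetD s.1 (PySem.List.pyGetD s.2 (PySem.Int.mod p.1 (n : Int)) 0) p.2,
             PySem.List.pySetD s.2 (PySem.Int.mod p.1 (n : Int))
               (PySem.List.pyGetD s.2 (PySem.Int.mod p.1 (n : Int)) 0 + 1)))
          (out, (List.range n).map (fun j => ((offB n base_row.length j + cntB n k j : Nat) : Int)))).1
        = tgt n base_row := by
  intro l
  set L := base_row.length with hL
  induction l with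
  | nil =>
    intro k out hlen hdrop holen hinv
    simp only [PySem.List.enumerate, List.foldl_nil]
    have hkL : L = k := by simpa using hlen
    apply List.ext_getElem
    · rw [holen, tgt_len n hn base_row]
    · intro q hq1 hq2
      have hqL : q < L := by rwa [holen] at hq1
      obtain ⟨j, hj, h1, h2⟩ := offB_exists n L hn q hqL
      have ht : q - offB n L j < cntB n k j := by
        rw [cntB_closed n hn k j hj, ← hkL]
        omega
      have := hinv j hj (q - offB n L j) ht
      rw [show offB n L j + (q - offB n L j) = q by omega] at this
      rw [List.getD_eq_getElem _ _ hq1, List.getD_eq_getElem _ _ hq2] at this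
      exact this
  | cons x xs ih =>
    intro k out hlen hdrop holen hinv
    rw [PySem.List.enumerate_cons, List.foldl_cons]
    set j0 := k % n with hj0def
    have hj0 : j0 < n := Nat.mod_lt _ (by omega)
    have hkL : k + 1 ≤ L := by simp [hlen]
    have hcnt1 : cntB n (k+1) j0 = cntB n k j0 + 1 := by
      show cntB n k j0 + _ = _
      rw [if_pos rfl]
    have hcnt_lt : cntB n k j0 < szB n L j0 := by
      have h1 := cntB_le n hn (k+1) L j0 hkL
      rw [cntB_closed n hn L j0 hj0] at h1
      omega
    have hpL : offB n L j0 + cntB n k j0 < L := by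
      have h1 : offB n L j0 + szB n L j0 = offB n L (j0 + 1) := rfl
      have h2 := offB_mono n L (show j0 + 1 ≤ n by omega)
      have h3 := offB_total n hn L
      omega
    have hx : x = base_row.getD k 0 := by
      have h1 : (base_row.drop k)[0]? = base_row[k + 0]? := List.getElem?_drop
      rw [← hdrop] at h1
      simp at h1
      rw [List.getD_eq_getElem?_getD, ← h1]
      rfl
    have hmod : PySem.Int.mod (↑k) (n : Int) = ((j0 : Nat) : Int) := PySem.Int.mod_natCast k n
    have hget : PySem.List.pyGetD
        ((List.range n).map (fun j => ((offB n L j + cntB n k j : Nat) : Int))) ((j0 : Nat) : Int) 0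
        = ((offB n L j0 + cntB n k j0 : Nat) : Int) := by
      rw [PySem.List.pyGetD_natCast]
      rw [List.getD_eq_getElem _ _ (by simp [hj0])]
      simp
    have hstarts : PySem.List.pySetD
        ((List.range n).map (fun j => ((offB n L j + cntB n k j : Nat) : Int))) ((j0 : Nat) : Int)
        (((offB n L j0 + cntB n k j0 : Nat) : Int) + 1)
        = (List.range n).map (fun j => ((offB n L j + cntB n (k+1) j : Nat) : Int)) := by
      rw [PySem.List.pySetD_natCast]
      apply List.ext_getElem
      · simp
      · intro i h1 h2
        simp only [List.length_set, List.length_map, List.length_range] at h1 h2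
        by_cases hij : i = j0
        · subst hij
          rw [List.getElem_set_self (by simp; omega)]
          rw [List.getElem_map, List.getElem_range, hcnt1]
          push_cast
          ring
        · rw [List.getElem_set_ne (by omega)]
          rw [List.getElem_map, List.getElem_range, List.getElem_map, List.getElem_range]
          have : cntB n (k+1) i = cntB n k i := by
            show cntB n k i + _ = _
            rw [if_neg (by omega)]
            omega
          rw [this]
    rw [hmod, hget, hstarts, PySem.List.pySetD_natCast]
    rw [show ((k : Int) + 1) = (((k+1 : Nat)) : Int) by push_cast; ring]
    apply ih (k+1) (out.set (offB n L j0 + cntB n k j0) x)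
    · simp at hlen ⊢
      omega
    · have h1 : List.drop (k+1) base_row = List.drop 1 (List.drop k base_row) := by
        rw [List.drop_drop]
      rw [h1, ← hdrop]
      simp
    · simp [holen]
    · intro j hj t ht
      by_cases hcase : j = j0 ∧ t = cntB n k j0
      · obtain ⟨hje, hte⟩ := hcase
        subst hje; subst hte
        rw [List.getD_eq_getElem?_getD, List.getElem?_set_self (by omega), Option.getD_some]
        rw [tgt_getD n hn base_row j0 (cntB n k j0) hj0 hcnt_lt]
        rw [cntB_closed n hn k j0 hj0, hj0def, szB_self n k hn]
        have hdm := Nat.div_add_mod k n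
        rw [show k % n + n * (k / n) = k by omega]
        exact hx
      · have htk : t < cntB n k j := by
          by_cases hje : j = j0
          · subst hje
            rw [hcnt1] at ht
            have : t ≠ cntB n k j0 := fun h => hcase ⟨rfl, h⟩
            omega
          · have : cntB n (k+1) j = cntB n k j := by
              show cntB n k j + _ = _
              rw [if_neg (by rw [← hj0def]; omega)]
              omega
            omega
        have hne : offB n L j0 + cntB n k j0 ≠ offB n L j + t := by
          by_cases hje : j = j0
          · subst hje
            intro h
            exact hcase ⟨rfl, by omega⟩
          · have hb1 : cntB n k j ≤ szB n L j := by
              have := cntB_le n hn k L j (by omega)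
              rw [cntB_closed n hn L j hj] at this
              exact this
            rcases Nat.lt_or_ge j j0 with hlt | hge
            · have e1 : offB n L j + szB n L j = offB n L (j+1) := rfl
              have e2 := offB_mono n L (show j + 1 ≤ j0 by omega)
              omega
            · have e1 : offB n L j0 + szB n L j0 = offB n L (j0+1) := rfl
              have e2 := offB_mono n L (show j0 + 1 ≤ j by omega)
              omega
        rw [List.getD_eq_getElem?_getD, List.getElem?_set_ne hne, ← List.getD_eq_getElem?_getD]
        exact hinv j hj t htk

lemma floordiv_szB (n L j : Nat) (hn : 1 ≤ n) (hj : j < n) :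
    PySem.Int.floordiv ((L : Int) - (j : Int) + (n : Int) - 1) (n : Int)
      = ((szB n L j : Nat) : Int) := by
  rcases Nat.lt_or_ge L j with h | h
  · have e : (L : Int) - (j : Int) + (n : Int) - 1 = ((n - 1 - (j - L) : Nat) : Int) := by
      omega
    rw [e, PySem.Int.floordiv_natCast, Nat.div_eq_of_lt (by omega)]
    unfold szB
    rw [show L - j = 0 by omega, Nat.div_eq_of_lt (by omega)]
  · have e : (L : Int) - (j : Int) + (n : Int) - 1 = ((L - j + n - 1 : Nat) : Int) := by
      omega
    rw [e, PySem.Int.floordiv_natCast]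
    rfl

lemma startsLoop (n L : Nat) (hn : 1 ≤ n) :
    ∀ m, m ≤ n →
      ((List.range m).foldl
        (fun (s : Array Int × Int) (j : Nat) =>
          (s.1.push s.2, s.2 + PySem.Int.floordiv ((L : Int) - (j : Int) + (n : Int) - 1) (n : Int)))
        (#[], 0))
      = (((List.range m).map (fun j => ((offB n L j : Nat) : Int))).toArray, ((offB n L m : Nat) : Int)) := by
  intro m
  induction m with
  | zero => intro _; rfl
  | succ m ih =>
    intro hm
    rw [List.range_succ, List.foldl_append, ih (by omega), List.foldl_cons, List.foldl_nil,
        List.map_append, floordiv_szB n L m hn (by omega)]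
    refine Prod.ext ?_ ?_
    · show (_ : Array Int).push _ = _
      rw [List.push_toArray]
      rfl
    · rfl

lemma mainB (base_row : List Int) (v : Int) (hv : 1 ≤ v) :
    create_second_row_alt base_row v = tgt v.toNat base_row := by
  obtain ⟨n, rfl⟩ : ∃ n : Nat, v = (n : Int) := ⟨v.toNat, (Int.toNat_of_nonneg (by omega)).symm⟩
  have hn : 1 ≤ n := by omega
  unfold create_second_row_alt
  dsimp only
  rw [PySem.List.pyRange_zero_natCast, List.foldl_map]
  rw [startsLoop n base_row.length hn n (le_refl n)]
  rw [Int.toNat_natCast]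
  rw [List.toList_toArray]
  have hmap : (List.range n).map (fun j => ((offB n base_row.length j : Nat) : Int))
      = (List.range n).map (fun j => ((offB n base_row.length j + cntB n 0 j : Nat) : Int)) := by
    apply List.map_congr_left
    intro j _
    rfl
  rw [hmap]
  rw [show (PySem.List.enumerate base_row : List (Int × Int)) = PySem.List.enumerate base_row ((0 : Nat) : Int) by rfl]
  exact scatter n hn base_row base_row 0 (List.replicate base_row.length 0)
    (by simp) (by simp) (by simp)
    (fun j hj t ht => by cases ht)

-- ===== VERDICT (by name: the statement is the Claim_ definition above) =====
theorem create_second_row_spec : Claim_equal_create_second_row := by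
  intro base_row v _ hpre
  unfold Spec_create_second_row
  by_cases hv : 1 ≤ v
  · rw [mainA base_row v hv, mainB base_row v hv]
  · have hb : base_row = [] := by
      rcases hpre with h | h
      · exact h
      · omega
    subst hb
    have hvle : v ≤ 0 := by omega
    unfold create_second_row create_second_row_alt
    dsimp only
    rw [bucketsInit, PySem.List.pyRange_one_eq_nil hvle]
    simp [PySem.List.enumerate]
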